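-- pv_equiv track=rewrite | github.com/cicorias/cvpr_clvision_challenge | continuum/charting.py | task_content
-- ===== SOURCE A (Python) =====
-- def task_content(output, task=1):
--     out_lines = output.splitlines()
--     first = 0
--     last = len(out_lines) - 1
--     for idx, line in enumerate(output.splitlines()):
--         if f"Task {task}" in line:
--             first = idx
--         if f"Task {task + 1}" in line:
--             last = idx
--             break
--     return out_lines[first:last]
-- ===== SOURCE B (Python) =====
-- def task_content(output, task=1):
--     lines = output.splitlines()
--     end_mark = f"Task {task + 1}"
--     last = next((i for i, l in enumerate(lines) if end_mark in l), len(lines) - 1)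
--     start_mark = f"Task {task}"
--     first = next((last - j for j, l in enumerate(reversed(lines[:last + 1])) if start_mark in l), 0)
--     return lines[first:last]
-- ===== Notes on version B (the rewrite author's own statement) =====
-- stated objective: alternative
-- what changed: Replaces A's single break-terminated loop carrying (first, last) state by two independent searches: a forward scan for the first end-marker line (default len-1), then a backward scan over the prefix up to it for the start marker (default 0), slicing once at the end.
import Mathlib
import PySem

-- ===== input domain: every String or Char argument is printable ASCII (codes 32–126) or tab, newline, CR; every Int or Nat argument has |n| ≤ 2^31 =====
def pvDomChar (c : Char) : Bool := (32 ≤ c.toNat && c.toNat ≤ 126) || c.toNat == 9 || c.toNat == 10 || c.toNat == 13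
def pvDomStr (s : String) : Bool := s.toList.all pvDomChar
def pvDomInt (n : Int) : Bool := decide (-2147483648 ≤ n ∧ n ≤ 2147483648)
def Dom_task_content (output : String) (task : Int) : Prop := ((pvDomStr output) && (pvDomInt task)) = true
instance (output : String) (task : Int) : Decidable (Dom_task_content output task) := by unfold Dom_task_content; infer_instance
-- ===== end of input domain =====

-- B replaces A's single break-terminated stateful loop by two independent searches
-- (forward for the end marker, backward over the prefix for the start marker); same cost, different decomposition.

-- ===== PORT A =====
-- the for/enumerate loop with its (first, last) state and break
def taskLoopA (s1 s2 : String) : List (Int × String) → Int × Int → Int × Int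
  | [], st => st
  | (idx, line) :: rest, (first, last) =>
    let first' := if PySem.Str.isIn s1 line then idx else first
    if PySem.Str.isIn s2 line then (first', idx)
    else taskLoopA s1 s2 rest (first', last)

def task_content (output : String) (task : Int) : List String :=
  let out_lines := PySem.Str.splitlines output
  let fl := taskLoopA ("Task " ++ PySem.Int.toStr task) ("Task " ++ PySem.Int.toStr (task + 1))
      (PySem.List.enumerate (PySem.Str.splitlines output) 0) (0, (out_lines.length : Int) - 1)
  PySem.List.slice out_lines (some fl.1) (some fl.2)

-- ===== PORT B =====
-- next((i for i, l in enumerate(lines) if end_mark in l), default)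
def findEndIdx (s2 : String) : List (Int × String) → Option Int
  | [] => none
  | (i, l) :: rest => if PySem.Str.isIn s2 l then some i else findEndIdx s2 rest

-- next((last - j for j, l in enumerate(reversed(prefix)) if start_mark in l), default)
def findStartIdx (s1 : String) (last : Int) : List (Int × String) → Option Int
  | [] => none
  | (j, l) :: rest => if PySem.Str.isIn s1 l then some (last - j) else findStartIdx s1 last rest

def task_content_alt (output : String) (task : Int) : List String :=
  let lines := PySem.Str.splitlines output
  let endMark := "Task " ++ PySem.Int.toStr (task + 1)
  let last := (findEndIdx endMark (PySem.List.enumerate lines 0)).getD ((lines.length : Int) - 1)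
  let startMark := "Task " ++ PySem.Int.toStr task
  let first := (findStartIdx startMark last
      (PySem.List.enumerate (PySem.List.slice lines none (some (last + 1))).reverse 0)).getD 0
  PySem.List.slice lines (some first) (some last)

-- ===== PRECONDITION & SPEC =====
def Spec_task_content (output : String) (task : Int) (out : List String) : Prop := out = task_content_alt output task
instance (output : String) (task : Int) (out : List String) : Decidable (Spec_task_content output task out) := by unfold Spec_task_content; infer_instance

-- ===== CLAIM (what is proved, stated in full; the proofs are below) =====
def Claim_equal_task_content : Prop := ∀ (output : String) (task : Int), Dom_task_content output task → Spec_task_content output task (task_content output task)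

-- ===== LEMMAS AND PROOFS =====

-- index of the FIRST line containing s2
def endIdxN (s2 : String) : List String → Option Nat
  | [] => none
  | l :: t => if PySem.Str.isIn s2 l then some 0 else (endIdxN s2 t).map (· + 1)

-- index of the LAST line containing s1
def lastHitN (s1 : String) : List String → Option Nat
  | [] => none
  | l :: t =>
    match lastHitN s1 t with
    | some k => some (k + 1)
    | none => if PySem.Str.isIn s1 l then some 0 else none

-- index of the FIRST line containing s1
def firstHitN (s1 : String) : List String → Option Nat
  | [] => none
  | l :: t => if PySem.Str.isIn s1 l then some 0 else (firstHitN s1 t).map (· + 1)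

theorem endIdxN_lt_length (s2 : String) (xs : List String) (e : Nat)
    (h : endIdxN s2 xs = some e) : e < xs.length := by
  induction xs generalizing e with
  | nil => simp [endIdxN] at h
  | cons l t ih =>
    simp only [endIdxN] at h
    split at h
    · simp at h; subst h; simp
    · rcases Option.map_eq_some_iff.mp h with ⟨e', he', rfl⟩
      have := ih e' he'
      simp; omega

theorem lastHitN_lt_length (s1 : String) (xs : List String) (k : Nat)
    (h : lastHitN s1 xs = some k) : k < xs.length := by
  induction xs generalizing k with
  | nil => simp [lastHitN] at h
  | cons l t ih =>
    simp only [lastHitN] at h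
    split at h
    · rename_i k' hk'
      cases h
      have := ih k' hk'
      simp; omega
    · split at h
      · cases h; simp
      · cases h

theorem findEndIdx_enumerate (s2 : String) (xs : List String) (off : Int) :
    findEndIdx s2 (PySem.List.enumerate xs off) = (endIdxN s2 xs).map (fun k => off + (k : Int)) := by
  induction xs generalizing off with
  | nil => simp [PySem.List.enumerate_nil, findEndIdx, endIdxN]
  | cons l t ih =>
    rw [PySem.List.enumerate_cons]
    simp only [findEndIdx, endIdxN]
    split
    · simp
    · rw [ih]
      cases endIdxN s2 t with
      | none => simp
      | some e => simp; try omega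

theorem firstHitN_append (s1 : String) (xs ys : List String) :
    firstHitN s1 (xs ++ ys) =
      match firstHitN s1 xs with
      | some j => some j
      | none => (firstHitN s1 ys).map (· + xs.length) := by
  induction xs with
  | nil => simp [firstHitN]
  | cons l t ih =>
    simp only [List.cons_append, firstHitN, ih]
    split
    · simp
    · cases firstHitN s1 t <;> cases firstHitN s1 ys <;> simp <;> try omega

theorem firstHitN_reverse (s1 : String) (xs : List String) :
    firstHitN s1 xs.reverse = (lastHitN s1 xs).map (fun k => xs.length - 1 - k) := by
  induction xs with
  | nil => simp [firstHitN, lastHitN]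
  | cons l t ih =>
    rw [List.reverse_cons, firstHitN_append, ih]
    simp only [lastHitN]
    cases hlt : lastHitN s1 t with
    | some k =>
      have hk := lastHitN_lt_length s1 t k hlt
      simp; omega
    | none =>
      simp only [Option.map_none]
      by_cases h : PySem.Str.isIn s1 l = true <;>
        simp [firstHitN, List.length_reverse]

theorem findStartIdx_enumerate (s1 : String) (last : Int) (ys : List String) :
    findStartIdx s1 last (PySem.List.enumerate ys 0) =
      (firstHitN s1 ys).map (fun j => last - (j : Int)) := by
  suffices h : ∀ (off : Int), findStartIdx s1 last (PySem.List.enumerate ys off) =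
      (firstHitN s1 ys).map (fun j => last - (off + (j : Int))) by
    simpa using h 0
  intro off
  induction ys generalizing off with
  | nil => simp [PySem.List.enumerate_nil, findStartIdx, firstHitN]
  | cons l t ih =>
    rw [PySem.List.enumerate_cons]
    simp only [findStartIdx, firstHitN]
    split
    · simp
    · rw [ih]
      cases firstHitN s1 t with
      | none => simp
      | some j => simp; omega

-- A's loop: last = first s2-hit (default l); first = last s1-hit in the prefix up to and
-- including the s2-hit line (default f)
theorem taskLoopA_eq (s1 s2 : String) (xs : List String) (off f l : Int) :
    taskLoopA s1 s2 (PySem.List.enumerate xs off) (f, l) =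
      match endIdxN s2 xs with
      | none => ((lastHitN s1 xs).elim f (fun k => off + (k : Int)), l)
      | some e => ((lastHitN s1 (xs.take (e + 1))).elim f (fun k => off + (k : Int)), off + (e : Int)) := by
  induction xs generalizing off f with
  | nil => simp [PySem.List.enumerate_nil, taskLoopA, endIdxN, lastHitN]
  | cons line t ih =>
    rw [PySem.List.enumerate_cons]
    simp only [taskLoopA, endIdxN]
    by_cases h2 : PySem.Chars.isIn s2.toList line.toList = true
    · simp only [PySem.Str.isIn_eq, h2, if_true]
      simp only [List.take_succ_cons, List.take_zero, lastHitN]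
      by_cases h1 : PySem.Chars.isIn s1.toList line.toList = true <;> simp [h1]
    · simp only [PySem.Str.isIn_eq, h2]
      rw [ih]
      cases het : endIdxN s2 t with
      | none =>
        simp only [Option.map_none, lastHitN]
        cases hlt : lastHitN s1 t with
        | some k => simp; omega
        | none => by_cases h1 : PySem.Chars.isIn s1.toList line.toList = true <;> simp [h1]
      | some e =>
        simp only [Option.map_some, List.take_succ_cons, lastHitN]
        cases hlt : lastHitN s1 (t.take (e + 1)) with
        | some k => simp [hlt]; constructor <;> omega
        | none =>
          by_cases h1 : PySem.Chars.isIn s1.toList line.toList = true <;> simp [hlt, h1] <;> omega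

theorem main_eq (s1 s2 : String) (lines : List String) :
    (taskLoopA s1 s2 (PySem.List.enumerate lines 0) (0, (lines.length : Int) - 1)) =
      (((findStartIdx s1 ((findEndIdx s2 (PySem.List.enumerate lines 0)).getD ((lines.length : Int) - 1))
          (PySem.List.enumerate (PySem.List.slice lines none
            (some ((findEndIdx s2 (PySem.List.enumerate lines 0)).getD ((lines.length : Int) - 1) + 1))).reverse 0)).getD 0),
        (findEndIdx s2 (PySem.List.enumerate lines 0)).getD ((lines.length : Int) - 1)) := by
  rw [taskLoopA_eq, findEndIdx_enumerate, findStartIdx_enumerate, firstHitN_reverse]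
  cases he : endIdxN s2 lines with
  | none =>
    have hall : PySem.List.slice lines none (some ((lines.length : Int) - 1 + 1)) = lines := by
      have h : (lines.length : Int) - 1 + 1 = ((lines.length : Nat) : Int) := by ring
      rw [h, PySem.List.slice_to_natCast, List.take_length]
    cases hlt : lastHitN s1 lines with
    | none => simp [hlt]
    | some k =>
      have hk := lastHitN_lt_length s1 lines k hlt
      simp [hlt]
      omega
  | some e =>
    have he' := endIdxN_lt_length s2 lines e he
    have hpre : PySem.List.slice lines none (some ((e : Int) + 1)) = lines.take (e + 1) := by
      have h : (e : Int) + 1 = ((e + 1 : Nat) : Int) := by push_cast; ring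
      rw [h, PySem.List.slice_to_natCast]
    have hlen : (lines.take (e + 1)).length = e + 1 := by simp; omega
    cases hlt : lastHitN s1 (lines.take (e + 1)) with
    | none => simp [hpre, hlt]
    | some k =>
      have hk := lastHitN_lt_length s1 _ k hlt
      rw [hlen] at hk
      simp [hpre, hlt, hlen]
      omega

-- ===== VERDICT (by name: the statement is the Claim_ definition above) =====
theorem task_content_spec : Claim_equal_task_content := by
  intro output task _
  unfold Spec_task_content task_content task_content_alt
  simp only [main_eq]
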